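-- pv_equiv track=rewrite | github.com/cpoulet/N-Puzzle | heuristics.py | _conflict
-- ===== SOURCE A (Python) =====
-- import itertools
--
-- def _conflict(li, aim):      #memoization could be usefull
--     if li == aim :
--         return 0
--     union = set(li) & set(aim)
--     k = 0
--     for x in itertools.permutations(union, 2):
--         if li.index(x[0]) > li.index(x[1]) and aim.index(x[0]) < aim.index(x[1]):
--             k += 2
--     return k
-- ===== SOURCE B (Python) =====
-- def _conflict(li, aim):
--     # Positions in aim of the distinct common elements, taken in li order,
--     # then count inversions of that sequence by merge sort; each inversion
--     # is a linear conflict and weighs 2.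
--     seen = set()
--     seq = []
--     for v in li:
--         if v not in seen:
--             seen.add(v)
--             if v in aim:
--                 seq.append(aim.index(v))
--
--     def sort_count(s):
--         if len(s) <= 1:
--             return s, 0
--         m = len(s) // 2
--         l, a = sort_count(s[:m])
--         r, b = sort_count(s[m:])
--         merged = []
--         inv = a + b
--         i = j = 0
--         while i < len(l) and j < len(r):
--             if l[i] <= r[j]:
--                 merged.append(l[i]); i += 1
--             else:
--                 merged.append(r[j]); j += 1; inv += len(l) - i
--         merged.extend(l[i:]); merged.extend(r[j:])
--         return merged, inv
--
--     return 2 * sort_count(seq)[1]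
-- ===== Notes on version B (the rewrite author's own statement) =====
-- stated objective: faster
-- what changed: Replaces the all-ordered-pairs permutation scan over the common elements by collecting the aim-positions of the distinct common elements in li order and counting inversions of that sequence with a divide-and-conquer merge sort (each inversion weighs 2).
import Mathlib
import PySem

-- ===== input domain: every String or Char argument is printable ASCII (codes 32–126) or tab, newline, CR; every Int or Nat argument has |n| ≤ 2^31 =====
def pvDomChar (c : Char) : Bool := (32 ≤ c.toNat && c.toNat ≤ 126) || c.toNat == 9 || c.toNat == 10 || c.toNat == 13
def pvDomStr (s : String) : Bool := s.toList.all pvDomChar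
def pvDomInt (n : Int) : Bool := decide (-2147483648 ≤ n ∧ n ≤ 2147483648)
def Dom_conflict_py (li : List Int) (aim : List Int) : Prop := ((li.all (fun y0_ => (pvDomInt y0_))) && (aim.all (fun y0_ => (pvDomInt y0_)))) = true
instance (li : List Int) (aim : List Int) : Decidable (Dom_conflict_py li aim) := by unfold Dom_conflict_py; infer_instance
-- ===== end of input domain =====

-- B collects the aim-positions of the distinct common elements in li order and counts
-- inversions of that sequence by merge sort (×2), replacing A's all-ordered-pairs scan
-- (objective: faster, asymptotically fewer pair tests).


-- ===== PORT A =====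
-- itertools.permutations(union, 2) = ordered pairs of distinct positions of `union`;
-- since a PySem.Set has no duplicates this is exactly the ordered pairs with x ≠ y.
-- li.index(x) always succeeds here (x ∈ li for every x in the intersection), so
-- (index? …).getD 0 is exact. The Python iterates the set in hash order; the result
-- is a sum over all ordered pairs, hence order-independent, so the port iterates the
-- intersection in li's first-occurrence order.
def conflict_py (li : List Int) (aim : List Int) : Int :=
  if li == aim then 0
  else
    let union : PySem.Set Int := PySem.Set.inter (PySem.Set.ofList li) aim
    union.foldl (fun k x =>
      union.foldl (fun k y =>
        if x ≠ y ∧ (PySem.List.index? li x).getD 0 > (PySem.List.index? li y).getD 0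
               ∧ (PySem.List.index? aim x).getD 0 < (PySem.List.index? aim y).getD 0
        then k + 2 else k) k) 0

-- ===== PORT B =====
-- Source B's merge loop walks l and r with indices i, j; the port recurses on the
-- unconsumed suffixes (the same state), adding len(l)-i = (a::l).length when an
-- r-element is taken, exactly as `inv += len(l) - i`.
def mergeCnt : List Nat → List Nat → List Nat × Int
  | [], r => (r, 0)
  | a :: l, [] => (a :: l, 0)
  | a :: l, b :: r =>
      if a ≤ b then
        let p := mergeCnt l (b :: r)
        (a :: p.1, p.2)
      else
        let p := mergeCnt (a :: l) r
        (b :: p.1, p.2 + ((a :: l).length : Int))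
termination_by l r => l.length + r.length

-- Source B's sort_count; the slices s[:m], s[m:] with 0 ≤ m ≤ len(s) are exactly take/drop.
def sortCnt (s : List Nat) : List Nat × Int :=
  if s.length ≤ 1 then (s, 0)
  else
    let m := s.length / 2
    let p := sortCnt (s.take m)
    let q := sortCnt (s.drop m)
    let r := mergeCnt p.1 q.1
    (r.1, p.2 + q.2 + r.2)
termination_by s.length
decreasing_by
  · simp only [List.length_take]; omega
  · simp only [List.length_drop]; omega

-- the scan `for v in li: if v not in seen: seen.add(v); if v in aim: seq.append(aim.index(v))`
def conflict_py_alt (li : List Int) (aim : List Int) : Int :=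
  let st := li.foldl (fun (st : PySem.Set Int × List Nat) v =>
      if st.1.contains v then st
      else (PySem.Set.add st.1 v,
            if aim.contains v then st.2 ++ [(PySem.List.index? aim v).getD 0] else st.2))
    (PySem.Set.empty, [])
  2 * (sortCnt st.2).2

-- ===== PRECONDITION & SPEC =====
def Spec_conflict_py (li : List Int) (aim : List Int) (out : Int) : Prop := out = conflict_py_alt li aim
instance (li : List Int) (aim : List Int) (out : Int) : Decidable (Spec_conflict_py li aim out) := by unfold Spec_conflict_py; infer_instance

-- ===== CLAIM (what is proved, stated in full; the proofs are below) =====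
def Claim_equal_conflict_py : Prop := ∀ (li : List Int) (aim : List Int), Dom_conflict_py li aim → Spec_conflict_py li aim (conflict_py li aim)

-- ===== LEMMAS AND PROOFS =====

-- abbreviations used only by the proofs
def idxN (l : List Int) (x : Int) : Nat := (PySem.List.index? l x).getD 0

def fA (li aim : List Int) (x y : Int) : Int :=
  if x ≠ y ∧ (PySem.List.index? li x).getD 0 > (PySem.List.index? li y).getD 0
         ∧ (PySem.List.index? aim x).getD 0 < (PySem.List.index? aim y).getD 0
  then 2 else 0

-- the number of inversions of a sequence, recursively (the spec of sort_count's counter)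
def invSpec : List Nat → Int
  | [] => 0
  | a :: t => ((t.countP (fun y => decide (y < a)) : Nat) : Int) + invSpec t

-- the number of pairs (a ∈ l, b ∈ r) with b < a
def crossCnt (l r : List Nat) : Int :=
  (r.map (fun b => ((l.countP (fun a => decide (b < a)) : Nat) : Int))).sum

-- ---- A's loops as sums (shape only) ----
theorem rowA_sum (li aim : List Int) (x : Int) (u : List Int) (k : Int) :
    u.foldl (fun k y =>
        if x ≠ y ∧ (PySem.List.index? li x).getD 0 > (PySem.List.index? li y).getD 0
               ∧ (PySem.List.index? aim x).getD 0 < (PySem.List.index? aim y).getD 0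
        then k + 2 else k) k
      = k + (u.map (fA li aim x)).sum := by
  induction u generalizing k with
  | nil => simp
  | cons a u ih => rw [List.foldl_cons, ih, List.map_cons, List.sum_cons, fA]; split <;> ring

theorem sumA (li aim : List Int) (u v : List Int) (k : Int) :
    v.foldl (fun k x =>
      u.foldl (fun k y =>
        if x ≠ y ∧ (PySem.List.index? li x).getD 0 > (PySem.List.index? li y).getD 0
               ∧ (PySem.List.index? aim x).getD 0 < (PySem.List.index? aim y).getD 0
        then k + 2 else k) k) k
      = k + (v.map (fun x => (u.map (fA li aim x)).sum)).sum := by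
  induction v generalizing k with
  | nil => simp
  | cons a v ih => rw [List.foldl_cons, rowA_sum, ih, List.map_cons, List.sum_cons]; ring

-- ---- merge sort counts inversions ----
theorem merge_spec (l r : List Nat) (hl : l.Pairwise (· ≤ ·)) (hr : r.Pairwise (· ≤ ·)) :
    (mergeCnt l r).1.Perm (l ++ r) ∧ (mergeCnt l r).1.Pairwise (· ≤ ·)
      ∧ (mergeCnt l r).2 = crossCnt l r := by
  induction l, r using mergeCnt.induct with
  | case1 r => simp [mergeCnt, crossCnt, hr]
  | case2 a l => simp [mergeCnt, crossCnt, hl]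
  | case3 a l b r hab ih =>
    obtain ⟨hperm, hsort, hcnt⟩ := ih (List.Pairwise.sublist (List.sublist_cons_self a l) hl) hr
    refine ⟨?_, ?_, ?_⟩
    · simpa [mergeCnt, hab] using hperm.cons a
    · simp only [mergeCnt, hab, if_true]
      refine List.pairwise_cons.mpr ⟨?_, hsort⟩
      intro x hx
      rcases (List.mem_append.mp (hperm.mem_iff.mp hx)) with h | h
      · exact List.rel_of_pairwise_cons hl h
      · rcases h with _ | ⟨_, h⟩
        · exact hab
        · exact le_trans hab (List.rel_of_pairwise_cons hr h)
    · simp only [mergeCnt, hab, if_true]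
      rw [hcnt]
      unfold crossCnt
      congr 1
      refine List.map_congr_left ?_
      intro y hy
      have hby : b ≤ y := by
        rcases hy with _ | ⟨_, hy⟩
        · exact le_refl _
        · exact List.rel_of_pairwise_cons hr hy
      rw [List.countP_cons]
      simp [show ¬ (y < a) from by omega]
  | case4 a l b r hab ih =>
    have hab' : b < a := by omega
    obtain ⟨hperm, hsort, hcnt⟩ := ih hl (List.Pairwise.sublist (List.sublist_cons_self b r) hr)
    refine ⟨?_, ?_, ?_⟩
    · simp only [mergeCnt, hab, if_false]
      exact (hperm.cons b).trans List.perm_middle.symm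
    · simp only [mergeCnt, hab, if_false]
      refine List.pairwise_cons.mpr ⟨?_, hsort⟩
      intro x hx
      rcases (List.mem_append.mp (hperm.mem_iff.mp hx)) with h | h
      · rcases h with _ | ⟨_, h⟩
        · exact le_of_lt hab'
        · exact le_trans (le_of_lt hab') (List.rel_of_pairwise_cons hl h)
      · exact List.rel_of_pairwise_cons hr h
    · simp only [mergeCnt, hab, if_false]
      rw [hcnt]
      unfold crossCnt
      rw [List.map_cons, List.sum_cons]
      have hall : (a :: l).countP (fun x => decide (b < x)) = (a :: l).length := by
        refine List.countP_eq_length.mpr ?_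
        intro x hx
        rcases hx with _ | ⟨_, hx⟩
        · simpa using hab'
        · simpa using lt_of_lt_of_le hab' (List.rel_of_pairwise_cons hl hx)
      rw [hall]
      ring

theorem invSpec_append (l r : List Nat) :
    invSpec (l ++ r) = invSpec l + invSpec r + crossCnt l r := by
  induction l with
  | nil => simp [invSpec, crossCnt]
  | cons a l ih =>
    rw [List.cons_append, invSpec, ih, invSpec, List.countP_append]
    have hsplit : crossCnt (a :: l) r
        = ((r.countP (fun y => decide (y < a)) : Nat) : Int) + crossCnt l r := by
      unfold crossCnt
      have hmap : r.map (fun b => (((a :: l).countP (fun a' => decide (b < a')) : Nat) : Int))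
          = r.map (fun b => (if (fun b' => decide (b' < a)) b = true then (1 : Int) else 0)
              + ((l.countP (fun a' => decide (b < a')) : Nat) : Int)) := by
        refine List.map_congr_left ?_
        intro b _
        rw [List.countP_cons]
        by_cases h : b < a
        · simp [h]; ring
        · simp [h]
      rw [hmap, PySem.List.sum_map_add_int, PySem.List.sum_map_ite_one_zero]
    rw [hsplit]
    push_cast
    ring

theorem crossCnt_perm {l l' r r' : List Nat} (hl : l.Perm l') (hr : r.Perm r') :
    crossCnt l r = crossCnt l' r' := by
  unfold crossCnt
  have hmap : r.map (fun b => ((l.countP (fun a => decide (b < a)) : Nat) : Int))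
      = r.map (fun b => ((l'.countP (fun a => decide (b < a)) : Nat) : Int)) := by
    refine List.map_congr_left ?_
    intro b _
    rw [hl.countP_eq]
  rw [hmap]
  exact (hr.map _).sum_eq

theorem sortCnt_spec (s : List Nat) :
    (sortCnt s).1.Perm s ∧ (sortCnt s).1.Pairwise (· ≤ ·) ∧ (sortCnt s).2 = invSpec s := by
  induction s using sortCnt.induct with
  | case1 s h =>
    rw [sortCnt, if_pos h]
    rcases s with _ | ⟨a, _ | ⟨b, t⟩⟩
    · simp [invSpec]
    · simp [invSpec]
    · simp at h
  | case2 s h m ihp ihq =>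
    obtain ⟨pperm, psort, pcnt⟩ := ihp
    obtain ⟨qperm, qsort, qcnt⟩ := ihq
    obtain ⟨mperm, msort, mcnt⟩ :=
      merge_spec (sortCnt (s.take m)).1 (sortCnt (s.drop m)).1 psort qsort
    rw [sortCnt, if_neg h]
    dsimp only
    refine ⟨?_, msort, ?_⟩
    · exact (mperm.trans (pperm.append qperm)).trans
        (by rw [List.take_append_drop])
    · rw [mcnt, pcnt, qcnt, crossCnt_perm pperm qperm]
      conv_rhs => rw [show s = s.take m ++ s.drop m from (List.take_append_drop m s).symm]
      rw [invSpec_append]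

theorem invSpec_zero_of_sorted (l : List Nat) (h : l.Pairwise (· < ·)) : invSpec l = 0 := by
  induction l with
  | nil => rfl
  | cons a t ih =>
    rw [invSpec, ih (List.Pairwise.sublist (List.sublist_cons_self a t) h)]
    have : t.countP (fun y => decide (y < a)) = 0 := by
      refine List.countP_eq_zero.mpr ?_
      intro y hy
      simpa using not_lt_of_gt (List.rel_of_pairwise_cons h hy)
    simp [this]

theorem sum_map_two_ite {α : Type} (f : α → Nat) (c : Nat) (t : List α) :
    (t.map (fun a => if f a < c then (2 : Int) else 0)).sum
      = 2 * ((t.countP (fun a => decide (f a < c)) : Nat) : Int) := by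
  induction t with
  | nil => simp
  | cons b t ih =>
    rw [List.map_cons, List.sum_cons, List.countP_cons, ih]
    by_cases h : f b < c
    · simp [h]; ring
    · simp [h]

-- ---- A's double sum = 2 * inversions, for a list sorted by li-index ----
theorem doubleSum_eq (li aim : List Int) (u : List Int)
    (h : u.Pairwise (fun x y => idxN li x < idxN li y)) :
    (u.map (fun x => (u.map (fA li aim x)).sum)).sum = 2 * invSpec (u.map (idxN aim)) := by
  induction u with
  | nil => simp [invSpec]
  | cons x t ih =>
    have hhead : ∀ y ∈ t, idxN li x < idxN li y := fun y hy => List.rel_of_pairwise_cons h hy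
    have htail := (List.pairwise_cons.mp h).2
    rw [List.map_cons, List.sum_cons, List.map_cons, List.sum_cons]
    have hrow : (t.map (fA li aim x)).sum = 0 := by
      rw [List.map_congr_left (fun y hy => show fA li aim x y = 0 from by
        have := hhead y hy
        unfold fA idxN at *
        rw [if_neg]
        rintro ⟨-, h2, -⟩
        omega)]
      simp
    have hself : fA li aim x x = 0 := by simp [fA]
    have hcols : (t.map (fun a => ((x :: t).map (fA li aim a)).sum)).sum
        = (t.map (fun a => fA li aim a x)).sum
          + (t.map (fun a => (t.map (fA li aim a)).sum)).sum := by
      rw [← PySem.List.sum_map_add_int]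
      refine congrArg List.sum (List.map_congr_left ?_)
      intro a _
      rw [List.map_cons, List.sum_cons]
    have hfirst : (t.map (fun a => fA li aim a x)).sum
        = (t.map (fun a => if idxN aim a < idxN aim x then (2 : Int) else 0)).sum := by
      refine congrArg List.sum (List.map_congr_left ?_)
      intro a ha
      have hlt := hhead a ha
      have hne : a ≠ x := by
        intro he; rw [he] at hlt; omega
      unfold fA idxN at *
      by_cases hc : (PySem.List.index? aim a).getD 0 < (PySem.List.index? aim x).getD 0
      · rw [if_pos ⟨hne, by omega, hc⟩, if_pos hc]
      · rw [if_neg (by rintro ⟨-, -, h3⟩; exact hc h3), if_neg hc]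
    have hcount : (t.map (fun a => if idxN aim a < idxN aim x then (2 : Int) else 0)).sum
        = 2 * (((t.map (idxN aim)).countP (fun y => decide (y < idxN aim x)) : Nat) : Int) := by
      rw [List.countP_map, show ((fun y => decide (y < idxN aim x)) ∘ idxN aim)
            = fun a => decide (idxN aim a < idxN aim x) from rfl]
      exact sum_map_two_ite (idxN aim) (idxN aim x) t
    rw [hself, hrow, hcols, hfirst, hcount, ih htail, List.map_cons, invSpec]
    ring

-- ---- first-occurrence order: Set.ofList li is strictly increasing in li-index ----
theorem index?_append_of_not_mem (pre t : List Int) (v : Int) (h : v ∉ pre) :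
    PySem.List.index? (pre ++ t) v = (PySem.List.index? t v).map (· + pre.length) := by
  induction pre with
  | nil => simp [Option.map_id']
  | cons a pre ih =>
    have hne : a ≠ v := fun he => h (he ▸ List.mem_cons_self)
    rw [List.cons_append, PySem.List.index?_cons_of_ne _ hne,
        ih (fun hv => h (List.mem_cons_of_mem _ hv)), Option.map_map]
    rcases PySem.List.index? t v with _ | k <;> simp

theorem foldl_add_pairwise (li : List Int) :
    ∀ (xs pre s : List Int), li = pre ++ xs → (∀ y, y ∈ s ↔ y ∈ pre) →
    s.Pairwise (fun a b => idxN li a < idxN li b) →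
    (xs.foldl PySem.Set.add s).Pairwise (fun a b => idxN li a < idxN li b) := by
  intro xs
  induction xs with
  | nil => intro pre s _ _ hs; simpa using hs
  | cons x xs ih =>
    intro pre s hli hmem hs
    rw [List.foldl_cons]
    refine ih (pre ++ [x]) (PySem.Set.add s x) (by rw [hli, List.append_assoc]; rfl) ?_ ?_
    · intro y
      rw [PySem.Set.mem_add, hmem, List.mem_append, List.mem_singleton]
    · by_cases hx : PySem.Set.contains s x = true
      · have hadd : PySem.Set.add s x = s := by unfold PySem.Set.add; rw [if_pos hx]
        rw [hadd]; exact hs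
      · have hxs : x ∉ s := by simpa [PySem.Set.contains] using hx
        have hxpre : x ∉ pre := fun hp => hxs ((hmem x).mpr hp)
        have hadd : PySem.Set.add s x = s ++ [x] := by unfold PySem.Set.add; rw [if_neg hx]
        rw [hadd, List.pairwise_append]
        refine ⟨hs, List.pairwise_singleton _ _, ?_⟩
        intro a ha b hb
        rw [List.mem_singleton] at hb
        rw [hb]
        have hapre : a ∈ pre := (hmem a).mp ha
        have hidxa : idxN li a < pre.length := by
          have heq : PySem.List.index? li a = PySem.List.index? pre a := by
            rw [hli]; exact PySem.List.index?_append_of_mem _ hapre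
          obtain ⟨k, hk⟩ := Option.isSome_iff_exists.mp
            ((PySem.List.index?_isSome_iff (xs := pre) (v := a)).mpr hapre)
          obtain ⟨hklt, -, -⟩ := PySem.List.getElem_of_index?_eq_some hk
          unfold idxN
          rw [heq, hk]
          simpa using hklt
        have hidxx : idxN li x = pre.length := by
          unfold idxN
          rw [hli, index?_append_of_not_mem _ _ _ hxpre, PySem.List.index?_cons_self]
          simp
        omega

theorem ofList_pairwise (li : List Int) :
    (PySem.Set.ofList li).Pairwise (fun a b => idxN li a < idxN li b) := by
  rw [PySem.Set.ofList_eq_foldl]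
  exact foldl_add_pairwise li li [] [] rfl (by simp) (List.Pairwise.nil)

-- ---- B's scan produces the filtered aim-index sequence ----
theorem prefix_foldl_add (xs : List Int) (s : List Int) :
    s <+: xs.foldl PySem.Set.add s := by
  induction xs generalizing s with
  | nil => exact List.prefix_refl s
  | cons x xs ih =>
    rw [List.foldl_cons]
    refine List.IsPrefix.trans ?_ (ih (PySem.Set.add s x))
    unfold PySem.Set.add
    split
    · exact List.prefix_refl s
    · exact List.prefix_append s [x]

def gAim (aim : List Int) (v : Int) : Option Nat :=
  if aim.contains v then some ((PySem.List.index? aim v).getD 0) else none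

theorem scan_eq (aim : List Int) :
    ∀ (xs : List Int) (s : PySem.Set Int) (out : List Nat),
    xs.foldl (fun (st : PySem.Set Int × List Nat) v =>
      if st.1.contains v then st
      else (PySem.Set.add st.1 v,
            if aim.contains v then st.2 ++ [(PySem.List.index? aim v).getD 0] else st.2))
      (s, out)
    = (xs.foldl PySem.Set.add s,
       out ++ ((xs.foldl PySem.Set.add s).drop s.length).filterMap (gAim aim)) := by
  intro xs
  induction xs with
  | nil => intro s out; simp
  | cons x xs ih =>
    intro s out
    rw [List.foldl_cons, List.foldl_cons]
    by_cases hx : PySem.Set.contains s x = true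
    · have hadd : PySem.Set.add s x = s := by unfold PySem.Set.add; rw [if_pos hx]
      simp only [hx, if_true, hadd]
      exact ih s out
    · have hadd : PySem.Set.add s x = s ++ [x] := by unfold PySem.Set.add; rw [if_neg hx]
      simp only [hx, Bool.false_eq_true, if_false]
      rw [ih]
      obtain ⟨rest, hrest⟩ := prefix_foldl_add xs (PySem.Set.add s x)
      rw [hadd] at hrest
      rw [hadd, ← hrest]
      have hdrop1 : ((s ++ [x]) ++ rest).drop s.length = x :: rest := by
        rw [List.append_assoc, List.drop_left]
        rfl
      have hdrop2 : ((s ++ [x]) ++ rest).drop (s ++ [x]).length = rest := List.drop_left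
      rw [hdrop1, hdrop2, List.filterMap_cons]
      unfold gAim
      by_cases ha : x ∈ aim <;> simp [ha]

theorem filterMap_gAim (aim : List Int) (l : List Int) :
    l.filterMap (gAim aim) = (l.filter (fun v => aim.contains v)).map (idxN aim) := by
  induction l with
  | nil => rfl
  | cons a l ih =>
    by_cases h : aim.contains a = true
    · have hg : gAim aim a = some (idxN aim a) := by unfold gAim idxN; rw [if_pos h]
      rw [List.filterMap_cons, hg, List.filter_cons, if_pos h, List.map_cons, ih]
    · have hg : gAim aim a = none := by unfold gAim; rw [if_neg h]
      rw [List.filterMap_cons, hg, List.filter_cons, if_neg h, ih]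

-- seq as computed by B's scan, in closed form
theorem seq_closed (li aim : List Int) :
    (li.foldl (fun (st : PySem.Set Int × List Nat) v =>
      if st.1.contains v then st
      else (PySem.Set.add st.1 v,
            if aim.contains v then st.2 ++ [(PySem.List.index? aim v).getD 0] else st.2))
      (PySem.Set.empty, [])).2
    = ((PySem.Set.ofList li).filter (fun v => aim.contains v)).map (idxN aim) := by
  rw [scan_eq]
  simp only [PySem.Set.empty]
  rw [← filterMap_gAim]
  rw [show (li.foldl PySem.Set.add []) = PySem.Set.ofList li from (PySem.Set.ofList_eq_foldl li).symm]
  simp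

-- the common-element list, shared by the two ports
theorem inter_eq_filter (li aim : List Int) :
    PySem.Set.inter (PySem.Set.ofList li) aim
      = (PySem.Set.ofList li).filter (fun v => aim.contains v) := by
  simp [PySem.Set.inter]

-- ===== VERDICT (by name: the statement is the Claim_ definition above) =====
theorem conflict_py_spec : Claim_equal_conflict_py := by
  intro li aim _
  unfold Spec_conflict_py conflict_py conflict_py_alt
  have hu : ((PySem.Set.ofList li).filter (fun v => aim.contains v)).Pairwise
      (fun a b => idxN li a < idxN li b) :=
    List.Pairwise.sublist List.filter_sublist (ofList_pairwise li)
  simp only [seq_closed]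
  set u := (PySem.Set.ofList li).filter (fun v => aim.contains v) with hu_def
  by_cases h : li = aim
  · subst h
    simp only [beq_self_eq_true, if_true]
    have hsorted : (u.map (idxN li)).Pairwise (· < ·) := List.pairwise_map.mpr hu
    rw [(sortCnt_spec (u.map (idxN li))).2.2, invSpec_zero_of_sorted _ hsorted]
    ring
  · have hne : (li == aim) = false := by simpa using h
    rw [hne]
    simp only [Bool.false_eq_true, if_false]
    rw [inter_eq_filter, ← hu_def, sumA, doubleSum_eq li aim u hu,
        (sortCnt_spec (u.map (idxN aim))).2.2]
    ring
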